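-- pv_equiv track=rewrite | github.com/JavierMonton/foo.bar.withgoogle | level5/expanding-nebula/expanding-nebula_v2.py | generate_possible_rows
-- ===== SOURCE A (Python) =====
-- import itertools
--
-- def generate_possible_rows(columns, expected):
--     """Generate all possible combinations and remove some of the invalid ones based on Trues"""
--     all = list(itertools.product([True, False], repeat=columns + 1))
--     final = []
--     # reduce the total number by removing impossible ones
--     for p in all:
--         to_remove = False
--         for i in range(0, len(expected)):
--             if expected[i] is True and p[i] is True and p[i+1] is True:
--                 to_remove = True
--                 break
--
--         if to_remove is False:
--             final.append(p)
--     return final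
-- ===== SOURCE B (Python) =====
-- def generate_possible_rows(columns, expected):
--     """Grow the rows position by position instead of filtering the full product.
--     First normalise the constraints into positional flags: block[i] means the
--     pair (i, i+1) may not be True,True.  Then extend each surviving prefix with
--     True, then False, dropping an extension as soon as it would violate a
--     blocked pair, so only valid rows are ever materialised."""
--     block = [False] * columns
--     for i, e in enumerate(expected):
--         if e:
--             block[i] = True
--     rows = [()]
--     for k in range(columns + 1):
--         rows = [r + (v,)
--                 for r in rows
--                 for v in (True, False)
--                 if not (v and k and r[-1] and block[k - 1])]
--     return rows
-- ===== Notes on version B (the rewrite author's own statement) =====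
-- stated objective: alternative
-- what changed: A enumerates all 2^(columns+1) tuples with itertools.product and filters them with a nested scan of expected; B first normalises expected into positional blocked-pair flags and then grows only the surviving prefixes position by position (True before False, preserving product order), pruning an extension the moment it would complete a blocked True,True pair, so the full product is never built. Pre_ excludes exactly the inputs where A raises: columns < -1 (ValueError from itertools.product) and an expected that is True at an index i >= columns (IndexError).
import Mathlib
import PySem

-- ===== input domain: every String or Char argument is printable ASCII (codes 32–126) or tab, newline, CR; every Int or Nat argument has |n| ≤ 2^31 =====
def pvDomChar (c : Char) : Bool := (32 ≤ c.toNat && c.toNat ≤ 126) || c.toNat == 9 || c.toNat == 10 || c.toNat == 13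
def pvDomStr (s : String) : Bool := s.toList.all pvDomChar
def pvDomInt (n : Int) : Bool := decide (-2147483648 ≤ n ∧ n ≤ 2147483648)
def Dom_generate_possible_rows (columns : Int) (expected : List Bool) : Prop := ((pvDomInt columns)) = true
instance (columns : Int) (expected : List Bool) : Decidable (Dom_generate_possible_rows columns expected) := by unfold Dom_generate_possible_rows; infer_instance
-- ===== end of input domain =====

-- B replaces A's build-the-full-product-then-filter with a pruned position-by-position expansion that
-- builds valid rows directly in the same order (alternative decomposition; equivalence of the RETURN value).

-- ===== PORT A =====
-- itertools.product([True, False], repeat = n): first coordinate varies slowest, True before False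
def pyProdTF : Nat → List (List Bool)
  | 0 => [[]]
  | n + 1 => (pyProdTF n).map (fun r => true :: r) ++ (pyProdTF n).map (fun r => false :: r)

-- inner loop of A: 'for i in range(0, len(expected)): if expected[i] and p[i] and p[i+1]'
-- (getD false is exact inside Pre_, where every access Python performs is in range)
def pyCheck (expected p : List Bool) : Bool :=
  (List.range expected.length).any fun i =>
    expected.getD i false && p.getD i false && p.getD (i + 1) false

def generate_possible_rows (columns : Int) (expected : List Bool) : List (List Bool) :=
  -- (columns + 1).toNat is exact for columns ≥ -1; Python raises for columns < -1 (outside Pre_)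
  (pyProdTF (columns + 1).toNat).foldl
    (fun final p => if pyCheck expected p = false then final ++ [p] else final) []

-- ===== PORT B =====
-- Source B's constraint normalisation: block = [False]*columns; block[i] = True for each True in
-- expected ([False]*negative is empty, exactly toNat; List.set is a no-op out of range, where
-- Source B raises IndexError — outside Pre_, where nothing is claimed)
def blockB (columns : Int) (expected : List Bool) : List Bool :=
  (expected.zipIdx).foldl (fun b p => if p.1 then b.set p.2 true else b)
    (List.replicate columns.toNat false)

-- one comprehension step of Source B: extend every surviving prefix r (of length k) with True then
-- False, dropping an extension that completes a blocked True,True pair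
-- ('k' truthy = k ≠ 0; r[-1] = getLast?, only consulted for k ≠ 0 where r is nonempty;
-- block[k-1] is in range whenever Python evaluates it, so getD is exact)
def stepB (block : List Bool) (rows : List (List Bool)) (k : Nat) : List (List Bool) :=
  rows.flatMap (fun r =>
    ([true, false].filter (fun v =>
      !(v && decide (k ≠ 0) && (r.getLast?.getD false) && block.getD (k - 1) false))).map
      (fun v => r ++ [v]))

def generate_possible_rows_alt (columns : Int) (expected : List Bool) : List (List Bool) :=
  -- 'for k in range(columns + 1)': Python's range is empty for columns + 1 ≤ 0, exactly toNat
  (List.range (columns + 1).toNat).foldl (stepB (blockB columns expected)) [[]]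

-- ===== PRECONDITION & SPEC =====
-- Pre_ excludes exactly the inputs where Python A raises: columns < -1 (ValueError from
-- itertools.product) and any input whose expected has a True at an index i ≥ columns
-- (then the inner loop's p[i+1] — or p[i] — is an IndexError on some tuple p).
def Pre_generate_possible_rows (columns : Int) (expected : List Bool) : Prop :=
  -1 ≤ columns ∧
    ∀ i ∈ List.range expected.length, expected.getD i false = true → (i : Int) < columns
instance (columns : Int) (expected : List Bool) : Decidable (Pre_generate_possible_rows columns expected) := by unfold Pre_generate_possible_rows; infer_instance

def pvWitness_generate_possible_rows : Int × List Bool := (2, [true])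

def Spec_generate_possible_rows (columns : Int) (expected : List Bool) (out : List (List Bool)) : Prop := out = generate_possible_rows_alt columns expected
instance (columns : Int) (expected : List Bool) (out : List (List Bool)) : Decidable (Spec_generate_possible_rows columns expected out) := by unfold Spec_generate_possible_rows; infer_instance

-- ===== CLAIM (what is proved, stated in full; the proofs are below) =====
def Claim_equal_generate_possible_rows : Prop := ∀ (columns : Int) (expected : List Bool), Dom_generate_possible_rows columns expected → Pre_generate_possible_rows columns expected → Spec_generate_possible_rows columns expected (generate_possible_rows columns expected)

-- ===== LEMMAS AND PROOFS =====

theorem pvGetD_lt {l s : List Bool} {i : Nat} (h : i < l.length) :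
    (l ++ s).getD i false = l.getD i false := by
  simp [List.getD, List.getElem?_append_left h]

theorem pvGetD_true_lt {l : List Bool} {i : Nat} (h : l.getD i false = true) : i < l.length := by
  by_contra h'
  push_neg at h'
  simp [List.getD, List.getElem?_eq_none_iff.mpr h'] at h

theorem pvGetD_concat_self (l : List Bool) (b : Bool) : (l ++ [b]).getD l.length false = b := by
  simp [List.getD, List.getElem?_concat_length]

theorem pvCheck_mono {expected pre : List Bool} (s : List Bool)
    (h : pyCheck expected pre = true) : pyCheck expected (pre ++ s) = true := by
  unfold pyCheck at *
  rcases List.any_eq_true.mp h with ⟨i, hi, hterm⟩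
  refine List.any_eq_true.mpr ⟨i, hi, ?_⟩
  simp only [Bool.and_eq_true] at hterm ⊢
  obtain ⟨⟨he, hp⟩, hp1⟩ := hterm
  exact ⟨⟨he, by rw [pvGetD_lt (pvGetD_true_lt hp)]; exact hp⟩,
    by rw [pvGetD_lt (pvGetD_true_lt hp1)]; exact hp1⟩

theorem pvCheck_append_false (expected pre : List Bool) :
    pyCheck expected (pre ++ [false]) = pyCheck expected pre := by
  unfold pyCheck
  congr 1
  funext i
  have key : ∀ j, (pre ++ [false]).getD j false = pre.getD j false := by
    intro j
    rcases lt_trichotomy j pre.length with h | h | h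
    · exact pvGetD_lt h
    · subst h
      rw [pvGetD_concat_self]
      simp [List.getD, List.getElem?_eq_none_iff.mpr (le_refl _)]
    · have h1 : pre.length < j := h
      simp [List.getD, List.getElem?_eq_none_iff.mpr (by simp; omega : (pre ++ [false]).length ≤ j),
        List.getElem?_eq_none_iff.mpr (by omega : pre.length ≤ j)]
  rw [key, key]

theorem pvCheck_append_true (expected pre : List Bool) :
    pyCheck expected (pre ++ [true]) =
      (pyCheck expected pre ||
        (expected.getD (pre.length - 1) false && pre.getD (pre.length - 1) false)) := by
  by_cases hr : (pyCheck expected pre ||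
        (expected.getD (pre.length - 1) false && pre.getD (pre.length - 1) false)) = true
  case neg =>
    rw [Bool.eq_false_iff.mpr hr]
    have hr : (pyCheck expected pre ||
        (expected.getD (pre.length - 1) false && pre.getD (pre.length - 1) false)) = false :=
      Bool.eq_false_iff.mpr hr
    simp only [Bool.or_eq_false_iff, Bool.and_eq_false_iff] at hr
    obtain ⟨hc, hx⟩ := hr
    by_contra hL
    rw [Bool.not_eq_false] at hL
    unfold pyCheck at hL
    rcases List.any_eq_true.mp hL with ⟨i, hmem, hterm⟩
    simp only [Bool.and_eq_true] at hterm
    obtain ⟨⟨he, hp⟩, hp1⟩ := hterm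
    have hp1lt := pvGetD_true_lt hp1
    simp only [List.length_append, List.length_cons, List.length_nil] at hp1lt
    rcases lt_trichotomy (i + 1) pre.length with h | h | h
    · -- violation already inside pre
      apply absurd hc
      rw [Bool.not_eq_false]
      unfold pyCheck
      refine List.any_eq_true.mpr ⟨i, hmem, ?_⟩
      simp only [Bool.and_eq_true]
      exact ⟨⟨he, by rw [← pvGetD_lt (by omega)]; exact hp⟩, by rw [← pvGetD_lt h]; exact hp1⟩
    · -- boundary pair: contradicts hx
      have hi : i = pre.length - 1 := by omega
      rcases hx with hx | hx
      · rw [hi] at he; rw [he] at hx; cases hx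
      · have : pre.getD i false = true := by rw [← pvGetD_lt (by omega)]; exact hp
        rw [hi] at this; rw [this] at hx; cases hx
    · omega
  case pos =>
    rw [hr]
    rw [Bool.or_eq_true] at hr
    rcases hr with hc | hx
    · exact pvCheck_mono [true] hc
    · rw [Bool.and_eq_true] at hx
      obtain ⟨he, hp⟩ := hx
      have hlt := pvGetD_true_lt hp
      have hpre : 1 ≤ pre.length := by omega
      unfold pyCheck
      refine List.any_eq_true.mpr ⟨pre.length - 1, List.mem_range.mpr (pvGetD_true_lt he), ?_⟩
      simp only [Bool.and_eq_true]
      refine ⟨⟨he, by rw [pvGetD_lt (by omega)]; exact hp⟩, ?_⟩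
      have : pre.length - 1 + 1 = pre.length := by omega
      rw [this, pvGetD_concat_self]

theorem pvCheck_nil (expected : List Bool) : pyCheck expected [] = false := by
  unfold pyCheck
  simp [List.getD]

theorem pvLength_pyProdTF : ∀ (n : Nat), ∀ r ∈ pyProdTF n, r.length = n := by
  intro n
  induction n with
  | zero => intro r hr; simp [pyProdTF] at hr; simp [hr]
  | succ n ih =>
    intro r hr
    simp only [pyProdTF, List.mem_append, List.mem_map] at hr
    rcases hr with ⟨s, hs, rfl⟩ | ⟨s, hs, rfl⟩ <;> simp [ih s hs]

theorem pvProdTF_flatMap (n : Nat) :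
    pyProdTF (n + 1) = (pyProdTF n).flatMap (fun r => [r ++ [true], r ++ [false]]) := by
  induction n with
  | zero => rfl
  | succ n ih =>
    show (pyProdTF (n + 1)).map (fun r => true :: r) ++ (pyProdTF (n + 1)).map (fun r => false :: r)
      = (pyProdTF (n + 1)).flatMap (fun r => [r ++ [true], r ++ [false]])
    conv_rhs =>
      rw [show pyProdTF (n + 1)
            = (pyProdTF n).map (fun r => true :: r) ++ (pyProdTF n).map (fun r => false :: r)
          from rfl]
    rw [ih]
    simp [List.flatMap_append, List.map_flatMap, List.flatMap_map]

theorem pvFilter_flatMap {α β : Type} (q : α → Bool) (F : α → List β) :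
    ∀ l : List α, (l.filter q).flatMap F = l.flatMap (fun r => if q r then F r else []) := by
  intro l
  induction l with
  | nil => rfl
  | cons a l ih =>
    rcases Bool.eq_false_or_eq_true (q a) with h | h <;>
      simp [List.filter_cons, h, ih]

theorem pvFoldSet (l : List Bool) : ∀ (s : Nat) (b : List Bool) (j : Nat),
    ((l.zipIdx s).foldl (fun acc p => if p.1 then acc.set p.2 true else acc) b).getD j false
      = (b.getD j false || (decide (s ≤ j) && decide (j < b.length) && l.getD (j - s) false)) := by
  induction l with
  | nil => intro s b j; simp [List.getD]
  | cons e tl ih =>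
    intro s b j
    simp only [List.zipIdx_cons, List.foldl_cons]
    cases e with
    | false =>
      rw [if_neg Bool.false_ne_true]
      rw [ih (s + 1) b j]
      rcases Nat.lt_trichotomy j s with h | h | h
      · simp [List.getD, Nat.sub_eq_zero_of_le (le_of_lt h), show ¬ (s ≤ j) by omega,
          show ¬ (s + 1 ≤ j) by omega]
      · subst h
        simp [List.getD, show ¬ (j + 1 ≤ j) by omega]
      · have h1 : j - s = (j - (s + 1)) + 1 := by omega
        simp [List.getD, h1, show s ≤ j by omega, show s + 1 ≤ j by omega]
    | true =>
      rw [if_pos rfl]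
      rw [ih (s + 1) (b.set s true) j]
      rcases Nat.lt_trichotomy j s with h | h | h
      · simp [List.getD, List.getElem?_set_ne (by omega : s ≠ j),
          Nat.sub_eq_zero_of_le (le_of_lt h), show ¬ (s ≤ j) by omega,
          show ¬ (s + 1 ≤ j) by omega]
      · subst h
        by_cases hj : j < b.length
        · simp [List.getD, List.getElem?_set_self, hj, show ¬ (j + 1 ≤ j) by omega]
        · simp [List.getD, List.getElem?_eq_none_iff.mpr (by omega : b.length ≤ j),
            List.getElem?_eq_none_iff.mpr (show (b.set j true).length ≤ j by simpa using (by omega : b.length ≤ j)),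
            show ¬ (j < b.length) by omega, show ¬ (j + 1 ≤ j) by omega]
      · have h1 : j - s = (j - (s + 1)) + 1 := by omega
        simp [List.getD, List.getElem?_set_ne (by omega : s ≠ j), h1,
          show s ≤ j by omega, show s + 1 ≤ j by omega]

theorem pvBlock_getD (columns : Int) (expected : List Bool) (j : Nat) :
    (blockB columns expected).getD j false
      = (decide (j < columns.toNat) && expected.getD j false) := by
  unfold blockB
  rw [pvFoldSet]
  simp [List.getD]

theorem pvBlock_pre {columns : Int} {expected : List Bool}
    (hpre : ∀ i ∈ List.range expected.length, expected.getD i false = true → (i : Int) < columns)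
    (j : Nat) : (blockB columns expected).getD j false = expected.getD j false := by
  rw [pvBlock_getD]
  by_cases he : expected.getD j false = true
  · have hj := pvGetD_true_lt he
    have := hpre j (List.mem_range.mpr hj) he
    simp only [List.getD] at he
    simp [he]
    omega
  · rw [Bool.not_eq_true] at he
    simp only [List.getD] at he
    simp [he]

theorem pvGetLast_getD {r : List Bool} {k : Nat} (hlen : r.length = k) :
    r.getLast?.getD false = r.getD (k - 1) false := by
  rw [List.getLast?_eq_getElem?, hlen]
  rfl

theorem pvStep_lemma {columns : Int} {expected : List Bool}
    (hpre : ∀ i ∈ List.range expected.length, expected.getD i false = true → (i : Int) < columns)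
    (k : Nat) :
    stepB (blockB columns expected) ((pyProdTF k).filter (fun r => !pyCheck expected r)) k
      = (pyProdTF (k + 1)).filter (fun r => !pyCheck expected r) := by
  rw [pvProdTF_flatMap]
  unfold stepB
  rw [pvFilter_flatMap]
  have hfilter : ∀ (l : List (List Bool)) (f : List Bool → List (List Bool)),
      (l.flatMap f).filter (fun r => !pyCheck expected r)
        = l.flatMap (fun r => (f r).filter (fun r => !pyCheck expected r)) := by
    intro l f
    induction l with
    | nil => rfl
    | cons a l ih => simp [List.flatMap_cons, List.filter_append, ih]
  rw [hfilter]
  apply List.flatMap_congr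
  intro r hr
  have hlen : r.length = k := pvLength_pyProdTF k r hr
  by_cases hc : pyCheck expected r = true
  · -- invalid prefix: dropped on the left, both extensions filtered out on the right
    rw [if_neg (by simp [hc])]
    have h1 : pyCheck expected (r ++ [true]) = true := pvCheck_mono [true] hc
    have h2 : pyCheck expected (r ++ [false]) = true := pvCheck_mono [false] hc
    simp [List.filter_cons, h1, h2]
  · rw [Bool.not_eq_true] at hc
    rw [if_pos (by simp [hc])]
    have h2 : pyCheck expected (r ++ [false]) = false := by
      rw [pvCheck_append_false]; exact hc
    have h1 : pyCheck expected (r ++ [true])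
        = (expected.getD (k - 1) false && r.getD (k - 1) false) := by
      rw [pvCheck_append_true, hc, Bool.false_or, hlen]
    rcases Nat.eq_zero_or_pos k with hk | hk
    · -- k = 0: r = [], no pruning and no boundary violation possible
      subst hk
      have : r = [] := List.length_eq_zero_iff.mp hlen
      subst this
      have h1' : pyCheck expected [true] = false := by simpa [List.getD] using h1
      have h2' : pyCheck expected [false] = false := by simpa using h2
      simp [List.filter_cons, h1', h2']
    · have hdk : decide (k ≠ 0) = true := by simp; omega
      have hlast : r.getLast?.getD false = r.getD (k - 1) false := pvGetLast_getD hlen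
      have hbl : (blockB columns expected).getD (k - 1) false
          = expected.getD (k - 1) false := pvBlock_pre hpre (k - 1)
      have h1' : pyCheck expected (r ++ [true])
          = (expected[k - 1]?.getD false && r[k - 1]?.getD false) := h1
      simp only [List.getD] at hbl hlast
      cases hrv : r[k - 1]?.getD false <;> cases hev : expected[k - 1]?.getD false <;>
        simp [List.filter_cons, h1', h2, hdk, hlast, hbl, hrv, hev, List.getD]

theorem pvFoldB_eq {columns : Int} {expected : List Bool}
    (hpre : ∀ i ∈ List.range expected.length, expected.getD i false = true → (i : Int) < columns)
    (N : Nat) :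
    (List.range N).foldl (stepB (blockB columns expected)) [[]]
      = (pyProdTF N).filter (fun r => !pyCheck expected r) := by
  induction N with
  | zero => simp [pyProdTF, pvCheck_nil]
  | succ N ih =>
    rw [List.range_succ, List.foldl_append, List.foldl_cons, List.foldl_nil, ih,
      pvStep_lemma hpre]

theorem pvFoldl_filter (cond : List Bool → Bool) (l : List (List Bool)) :
    ∀ acc, l.foldl (fun final p => if cond p = false then final ++ [p] else final) acc
      = acc ++ l.filter (fun p => !cond p) := by
  induction l with
  | nil => intro acc; simp
  | cons p l ih =>
    intro acc
    rcases Bool.eq_false_or_eq_true (cond p) with h | h <;>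
      simp [List.foldl_cons, h, ih, List.filter_cons]


-- ===== VERDICT (by name: the statement is the Claim_ definition above) =====
theorem generate_possible_rows_spec : Claim_equal_generate_possible_rows := by
  unfold Claim_equal_generate_possible_rows
  intro columns expected _ hpre
  unfold Spec_generate_possible_rows generate_possible_rows generate_possible_rows_alt
  rw [pvFoldl_filter, pvFoldB_eq hpre.2]
  simp
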